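-- pv_equiv track=rewrite | github.com/valentinsoare/WithPython | relearningPy/invoices.py | header_message_prep
-- ===== SOURCE A (Python) =====
-- def header_message_prep(given_message_for_header):
--     message_to_use = '* '
--     count_white_spaces = 0
--
--     for i in given_message_for_header:
--         if i == ' ' and count_white_spaces == 1:
--             message_to_use += ' ' + '#' + ' '
--         elif i == ' ':
--             count_white_spaces += 1
--             message_to_use += ' '
--         else:
--             message_to_use += i
--
--     message_to_use += ' *'
--     return message_to_use
-- ===== SOURCE B (Python) =====
-- def header_message_prep(given_message_for_header):
--     idx = given_message_for_header.find(' ')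
--     if idx == -1:
--         transform = given_message_for_header
--     else:
--         transform = (given_message_for_header[:idx] + ' '
--                      + given_message_for_header[idx + 1:].replace(' ', ' # '))
--     return '* ' + transform + ' *'
-- ===== Notes on version B (the rewrite author's own statement) =====
-- stated objective: faster
-- what changed: Replaces A's stateful char-by-char loop with a space counter by locating the first space with str.find, keeping the prefix, and bulk-rewriting every later space with one str.replace(' ', ' # ') call.
import Mathlib
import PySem

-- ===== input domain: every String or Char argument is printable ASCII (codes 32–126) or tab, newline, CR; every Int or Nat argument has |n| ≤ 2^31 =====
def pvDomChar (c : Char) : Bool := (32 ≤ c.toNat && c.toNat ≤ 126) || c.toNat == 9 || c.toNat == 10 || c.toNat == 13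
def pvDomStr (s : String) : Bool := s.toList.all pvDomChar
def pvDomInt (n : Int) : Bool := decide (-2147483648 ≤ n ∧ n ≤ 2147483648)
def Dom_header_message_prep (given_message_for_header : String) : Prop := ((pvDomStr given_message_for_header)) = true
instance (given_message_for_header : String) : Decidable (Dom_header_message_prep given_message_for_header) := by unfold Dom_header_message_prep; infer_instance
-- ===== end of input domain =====

-- B replaces A's stateful char loop by find-first-space + slice + bulk replace(' ', ' # '); return value only.

-- ===== PORT A =====
-- one step of A's for-loop: state = (message_to_use, count_white_spaces)
def hmpStep (st : List Char × Int) (i : Char) : List Char × Int :=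
  if i = ' ' ∧ st.2 = 1 then (st.1 ++ [' ', '#', ' '], st.2)
  else if i = ' ' then (st.1 ++ [' '], st.2 + 1)
  else (st.1 ++ [i], st.2)

def header_message_prep (given_message_for_header : String) : String :=
  let r := given_message_for_header.toList.foldl hmpStep (['*', ' '], 0)
  String.ofList (r.1 ++ [' ', '*'])

-- ===== PORT B =====
def header_message_prep_alt (given_message_for_header : String) : String :=
  let idx := PySem.Str.find given_message_for_header " "
  let transform : List Char :=
    if idx = -1 then given_message_for_header.toList
    else PySem.Chars.slice given_message_for_header.toList none (some idx) ++ [' '] ++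
      PySem.Chars.replace (PySem.Chars.slice given_message_for_header.toList (some (idx + 1)) none)
        [' '] [' ', '#', ' ']
  String.ofList (['*', ' '] ++ transform ++ [' ', '*'])

-- ===== PRECONDITION & SPEC =====
def Spec_header_message_prep (given_message_for_header : String) (out : String) : Prop := out = header_message_prep_alt given_message_for_header
instance (given_message_for_header : String) (out : String) : Decidable (Spec_header_message_prep given_message_for_header out) := by unfold Spec_header_message_prep; infer_instance

-- ===== CLAIM (what is proved, stated in full; the proofs are below) =====
def Claim_equal_header_message_prep : Prop := ∀ (given_message_for_header : String), Dom_header_message_prep given_message_for_header → Spec_header_message_prep given_message_for_header (header_message_prep given_message_for_header)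

-- ===== LEMMAS AND PROOFS =====

theorem foldl_hmpStep_nospace (l : List Char) (acc : List Char) (c : Int)
    (h : ∀ x ∈ l, x ≠ ' ') : l.foldl hmpStep (acc, c) = (acc ++ l, c) := by
  induction l generalizing acc with
  | nil => simp
  | cons y t ih =>
    have hy : y ≠ ' ' := h y (by simp)
    have hs : hmpStep (acc, c) y = (acc ++ [y], c) := by
      simp [hmpStep, hy]
    rw [List.foldl_cons, hs, ih _ (fun x hx => h x (by simp [hx]))]
    simp

theorem foldl_hmpStep_one (l : List Char) (acc : List Char) :
    l.foldl hmpStep (acc, 1)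
      = (acc ++ l.flatMap (fun x => if x = ' ' then [' ', '#', ' '] else [x]), 1) := by
  induction l generalizing acc with
  | nil => simp
  | cons y t ih =>
    by_cases hy : y = ' '
    · subst hy
      have hs : hmpStep (acc, 1) ' ' = (acc ++ [' ', '#', ' '], 1) := by
        simp [hmpStep]
      rw [List.foldl_cons, hs, ih]
      simp
    · have hs : hmpStep (acc, 1) y = (acc ++ [y], 1) := by
        simp [hmpStep, hy]
      rw [List.foldl_cons, hs, ih]
      simp [hy]

theorem replace_go_single (c : Char) (new : List Char) (l acc : List Char) (fuel : Nat)
    (hf : l.length ≤ fuel) :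
    PySem.Chars.replace.go [c] new fuel l acc
      = acc.reverse ++ l.flatMap (fun x => if x = c then new else [x]) := by
  induction l generalizing fuel acc with
  | nil => cases fuel <;> simp [PySem.Chars.replace.go]
  | cons y t ih =>
    cases fuel with
    | zero => simp at hf
    | succ n =>
      simp only [PySem.Chars.replace.go]
      by_cases hy : y = c
      · subst hy
        rw [if_pos (by simp [List.isPrefixOf])]
        simp only [List.length_singleton, List.drop_succ_cons, List.drop_zero]
        rw [ih _ _ (by simpa using hf)]
        simp
      · rw [if_neg (by simp [List.isPrefixOf]; exact fun h => hy h.symm)]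
        rw [ih _ _ (by simpa using hf)]
        simp [hy]

theorem replace_single (l : List Char) (c : Char) (new : List Char) :
    PySem.Chars.replace l [c] new
      = l.flatMap (fun x => if x = c then new else [x]) := by
  rw [PySem.Chars.replace, if_neg (by simp)]
  simpa using replace_go_single c new l [] l.length le_rfl

-- ===== VERDICT (by name: the statement is the Claim_ definition above) =====
theorem header_message_prep_spec : Claim_equal_header_message_prep := by
  intro s _
  unfold Spec_header_message_prep header_message_prep header_message_prep_alt
  simp only [PySem.Str.find_eq]
  set l := s.toList with hl
  have hsub : (" " : String).toList = [' '] := rfl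
  rw [hsub]
  by_cases hneg : PySem.Chars.find l [' '] = -1
  · -- no space in the string
    have hni : ¬ ([' '] <:+: l) := (PySem.Chars.find_eq_neg_one_iff l [' ']).1 hneg
    have hno : ∀ x ∈ l, x ≠ ' ' := by
      intro x hx hxe
      exact hni ((List.singleton_infix_iff ' ' l).mpr (hxe ▸ hx))
    rw [foldl_hmpStep_nospace l _ 0 hno, if_pos hneg]
  · -- a first space exists at index j
    have hge : 0 ≤ PySem.Chars.find l [' '] := by
      have := PySem.Chars.neg_one_le_find l [' ']
      omega
    obtain ⟨hpre, hmin⟩ := PySem.Chars.find_spec (s := l) (sub := [' ']) hge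
    set j := (PySem.Chars.find l [' ']).toNat with hj
    have hjc : PySem.Chars.find l [' '] = (j : Int) := (Int.toNat_of_nonneg hge).symm
    obtain ⟨rest, hdrop⟩ : ∃ rest, l.drop j = ' ' :: rest := by
      obtain ⟨t, ht⟩ := hpre
      exact ⟨t, by rw [← ht]; rfl⟩
    have hrest : rest = l.drop (j + 1) := by
      have h1 : (l.drop j).tail = l.drop (j + 1) := List.tail_drop
      rw [hdrop] at h1
      simpa using h1
    have hjlen : j < l.length := by
      by_contra hc
      simp [List.drop_eq_nil_of_le (le_of_not_gt hc)] at hdrop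
    have hsplit : l = l.take j ++ ' ' :: l.drop (j + 1) := by
      conv_lhs => rw [← List.take_append_drop j l]
      rw [hdrop, hrest]
    have htake : ∀ x ∈ l.take j, x ≠ ' ' := by
      intro x hx hxe
      obtain ⟨i, hi, hxi⟩ := List.getElem_of_mem hx
      have hij : i < j := by
        have := hi
        simp only [List.length_take] at this
        omega
      have hil : i < l.length := by omega
      apply hmin i hij
      have hxe' : l[i] = ' ' := by
        have hgt : (l.take j)[i] = l[i] := List.getElem_take
        rw [← hxi, hgt] at hxe
        exact hxe
      have hdi : l.drop i = ' ' :: l.drop (i + 1) := by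
        rw [← hxe']; exact List.drop_eq_getElem_cons hil
      rw [hdi]
      exact ⟨_, rfl⟩
    -- A side: split the loop at the first space
    conv_lhs => rw [hsplit]
    rw [List.foldl_append, foldl_hmpStep_nospace _ _ 0 htake, List.foldl_cons]
    have hstep : hmpStep (['*', ' '] ++ l.take j, 0) ' ' = (['*', ' '] ++ l.take j ++ [' '], 1) := by
      simp [hmpStep]
    rw [hstep, foldl_hmpStep_one]
    -- B side: slices and the bulk replace
    rw [if_neg (by rw [hjc]; omega), hjc,
      PySem.Chars.slice_eq_listSlice, PySem.Chars.slice_eq_listSlice,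
      PySem.List.slice_to _ (by omega : (0:Int) ≤ (j:Int))]
    have hcast : ((j : Int) + 1) = ((j + 1 : Nat) : Int) := by push_cast; ring
    rw [hcast, PySem.List.slice_from _ (by omega : (0:Int) ≤ ((j+1 : Nat) : Int))]
    rw [replace_single]
    simp
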